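-- pv_equiv track=rewrite | github.com/takapdayon/atcoder | python/_abc/AtCoderBeginnerContest118/B.py | Foods_Loved
-- ===== SOURCE A (Python) =====
-- def Foods_Loved(n, m, kal):
--
--     ans = 0
--
--     for i in range(1, m+1):
--         flag = True
--         for ka in kal:
--             if i not in ka[1:]:
--                 flag = False
--         if flag:
--             ans += 1
--
--     return ans
-- ===== SOURCE B (Python) =====
-- def Foods_Loved(n, m, kal):
--     cnt = {}
--     for ka in kal:
--         for x in set(ka[1:]):
--             cnt[x] = cnt.get(x, 0) + 1
--     return sum(1 for i in range(1, m + 1) if cnt.get(i, 0) == len(kal))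
-- ===== Notes on version B (the rewrite author's own statement) =====
-- stated objective: alternative
-- what changed: Instead of rescanning every person's list for each of the m foods, B makes one pass over the people building a dict counting how many people like each food (deduplicated per person), then counts foods whose count equals the number of people.
import Mathlib
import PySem

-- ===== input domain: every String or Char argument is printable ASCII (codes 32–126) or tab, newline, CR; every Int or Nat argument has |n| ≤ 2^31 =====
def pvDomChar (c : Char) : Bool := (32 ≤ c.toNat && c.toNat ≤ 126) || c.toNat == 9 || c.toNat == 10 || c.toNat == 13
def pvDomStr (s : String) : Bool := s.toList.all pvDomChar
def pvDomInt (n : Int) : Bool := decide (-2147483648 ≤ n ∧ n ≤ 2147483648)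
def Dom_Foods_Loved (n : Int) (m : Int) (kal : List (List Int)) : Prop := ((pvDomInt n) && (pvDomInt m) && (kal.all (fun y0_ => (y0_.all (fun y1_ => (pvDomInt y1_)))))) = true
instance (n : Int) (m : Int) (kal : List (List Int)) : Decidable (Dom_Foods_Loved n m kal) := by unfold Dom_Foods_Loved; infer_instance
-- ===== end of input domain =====

-- ===== PORT A =====
-- B replaces the per-food rescan of every person's list by one counting pass over the
-- people (a dict mapping food -> number of people liking it); return values proved equal.
def Foods_Loved (_n : Int) (m : Int) (kal : List (List Int)) : Int :=
  (PySem.List.pyRange 1 (m + 1) 1).foldl (fun ans i =>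
    let flag := kal.foldl (fun flag ka =>
      if ¬ ((PySem.List.slice ka (some 1) none).contains i) then false else flag) true
    if flag then ans + 1 else ans) 0

-- ===== PORT B =====
def Foods_Loved_alt (_n : Int) (m : Int) (kal : List (List Int)) : Int :=
  let cnt : PySem.Dict Int Int := kal.foldl (fun cnt ka =>
    (PySem.Set.ofList (PySem.List.slice ka (some 1) none)).foldl
      (fun cnt x => cnt.insert x (cnt.getD x 0 + 1)) cnt) PySem.Dict.empty
  ((PySem.List.pyRange 1 (m + 1) 1).countP
      (fun i => cnt.getD i 0 == (kal.length : Int)) : Int)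

-- ===== PRECONDITION & SPEC =====
def Spec_Foods_Loved (n : Int) (m : Int) (kal : List (List Int)) (out : Int) : Prop := out = Foods_Loved_alt n m kal
instance (n : Int) (m : Int) (kal : List (List Int)) (out : Int) : Decidable (Spec_Foods_Loved n m kal out) := by unfold Spec_Foods_Loved; infer_instance

-- ===== CLAIM (what is proved, stated in full; the proofs are below) =====
def Claim_equal_Foods_Loved : Prop := ∀ (n : Int) (m : Int) (kal : List (List Int)), Dom_Foods_Loved n m kal → Spec_Foods_Loved n m kal (Foods_Loved n m kal)

-- ===== LEMMAS AND PROOFS =====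

-- A's inner flag loop computes "i is in every person's tail".
theorem flag_fold (kal : List (List Int)) (i : Int) (b : Bool) :
    kal.foldl (fun flag ka =>
      if ¬ ((PySem.List.slice ka (some 1) none).contains i) then false else flag) b
      = (b && kal.all (fun ka => (PySem.List.slice ka (some 1) none).contains i)) := by
  induction kal generalizing b with
  | nil => simp
  | cons ka rest ih =>
    simp only [List.foldl_cons, List.all_cons, ih]
    cases b <;> simp

-- A's outer counting loop is a countP.
theorem count_fold (l : List Int) (p : Int → Bool) (a : Int) :
    l.foldl (fun ans i => if p i then ans + 1 else ans) a = a + l.countP p := by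
  induction l generalizing a with
  | nil => simp
  | cons x xs ih =>
    by_cases h : p x = true <;> simp [h, ih] <;> ring

-- a deduplicated list counts each member exactly once
theorem count_ofList (l : List Int) (i : Int) :
    (PySem.Set.ofList l).count i = if l.contains i then 1 else 0 := by
  by_cases h : i ∈ l
  · rw [if_pos (by simpa using h)]
    exact List.count_eq_one_of_mem (PySem.Set.nodup_ofList l) (by simpa [PySem.Set.mem_ofList])
  · rw [if_neg (by simpa using h)]
    exact List.count_eq_zero_of_not_mem (by simpa [PySem.Set.mem_ofList])

-- B's dict loop counts, for each food, the people whose tail contains it.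
theorem cnt_fold (kal : List (List Int)) (d : PySem.Dict Int Int) (i : Int) :
    (kal.foldl (fun cnt ka =>
        (PySem.Set.ofList (PySem.List.slice ka (some 1) none)).foldl
          (fun cnt x => cnt.insert x (cnt.getD x 0 + 1)) cnt) d).getD i 0
      = d.getD i 0 + (kal.countP (fun ka => (PySem.List.slice ka (some 1) none).contains i) : Int) := by
  induction kal generalizing d with
  | nil => simp
  | cons ka rest ih =>
    rw [List.foldl_cons, ih, PySem.Dict.getD_foldl_insert_add_one, count_ofList,
      List.countP_cons]
    by_cases h : (PySem.List.slice ka (some 1) none).contains i = true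
    · simp [h]; ring
    · simp [h]; ring

-- ===== VERDICT (by name: the statement is the Claim_ definition above) =====
theorem Foods_Loved_spec : Claim_equal_Foods_Loved := by
  intro n m kal _
  unfold Spec_Foods_Loved Foods_Loved Foods_Loved_alt
  simp only [flag_fold, Bool.true_and, count_fold, zero_add, cnt_fold,
    PySem.Dict.getD_empty, zero_add]
  congr 1
  apply List.countP_congr
  intro i _
  cases hall : kal.all (fun ka => (PySem.List.slice ka (some 1) none).contains i) with
  | true =>
    have hc := List.countP_eq_length.mpr (List.all_eq_true.mp hall)
    rw [hc]
    simp
  | false =>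
    have hne : List.countP (fun ka => (PySem.List.slice ka (some 1) none).contains i) kal
        ≠ kal.length := by
      intro hc
      rw [List.all_eq_true.mpr (List.countP_eq_length.mp hc)] at hall
      cases hall
    have hb : ((↑(List.countP (fun ka => (PySem.List.slice ka (some 1) none).contains i) kal) : Int)
        == (↑kal.length : Int)) = false := by
      rw [beq_eq_false_iff_ne]
      exact fun hc => hne (Int.natCast_inj.mp hc)
    rw [hb]
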